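-- pv_equiv track=rewrite | github.com/infinohq/infino-sdk | infino_sdk/lib.py | uri_encode
-- ===== SOURCE A (Python) =====
-- def uri_encode(s: str) -> str:
--     """URI encode string for AWS SigV4"""
--     encoded = ""
--     for byte in s.encode('utf-8'):
--         if (byte >= ord('A') and byte <= ord('Z')) or \
--            (byte >= ord('a') and byte <= ord('z')) or \
--            (byte >= ord('0') and byte <= ord('9')) or \
--            byte == ord('-') or byte == ord('_') or \
--            byte == ord('.') or byte == ord('~'):
--             encoded += chr(byte)
--         else:
--             encoded += f"%{byte:02X}"
--     return encoded
-- ===== SOURCE B (Python) =====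
-- _SAFE = b"ABCDEFGHIJKLMNOPQRSTUVWXYZabcdefghijklmnopqrstuvwxyz0123456789-_.~"
--
-- def uri_encode(s: str) -> str:
--     """URI encode string for AWS SigV4"""
--     data = s.encode('utf-8')
--     n = len(data)
--     parts = []
--     i = 0
--     while i < n:
--         j = i
--         while j < n and data[j] in _SAFE:
--             j += 1
--         parts.append(data[i:j].decode('ascii'))  # maximal safe run, copied verbatim
--         if j < n:
--             parts.append("%%%02X" % data[j])     # one unsafe byte, percent-encoded
--             j += 1
--         i = j
--     return "".join(parts)
-- ===== Notes on version B (the rewrite author's own statement) =====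
-- stated objective: faster
-- what changed: Replaced the per-byte branch-and-concatenate loop with a run-based two-pointer scan that copies maximal runs of unreserved bytes verbatim as slices and percent-encodes only the single unsafe byte between runs.
import Mathlib
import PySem

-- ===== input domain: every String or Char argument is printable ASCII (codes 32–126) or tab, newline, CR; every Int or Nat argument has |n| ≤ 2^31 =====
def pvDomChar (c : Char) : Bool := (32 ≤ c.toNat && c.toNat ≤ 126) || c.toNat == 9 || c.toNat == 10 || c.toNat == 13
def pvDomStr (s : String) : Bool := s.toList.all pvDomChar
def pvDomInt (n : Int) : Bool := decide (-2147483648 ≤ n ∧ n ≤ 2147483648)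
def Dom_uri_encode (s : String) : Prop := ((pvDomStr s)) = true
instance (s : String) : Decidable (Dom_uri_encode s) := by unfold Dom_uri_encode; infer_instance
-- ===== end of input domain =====

-- B replaces A's per-byte branch-and-concatenate loop with a run-based two-pointer scan:
-- maximal runs of unreserved bytes are copied verbatim and only the single unsafe byte
-- between runs is percent-encoded (alternative decomposition, same O(n) cost).
-- On Dom (ASCII) every character is a single UTF-8 byte equal to its code, so 's.encode("utf-8")'
-- is ported as the list of character codes (exact on the stated ASCII domain).

-- f"%{byte:02X}" / "%%%02X" for byte < 256: '%' plus two uppercase hex digits (shared formatting helper)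
def pvHexDigit (n : Nat) : Char := if n < 10 then Char.ofNat (48 + n) else Char.ofNat (55 + n)

-- ===== PORT A =====
def uri_encode (s : String) : String :=
  String.mk
    (s.toList.foldl
      (fun encoded c =>
        let byte := c.toNat   -- the UTF-8 byte of c (exact on the ASCII domain)
        encoded ++
          (if (65 ≤ byte ∧ byte ≤ 90) ∨ (97 ≤ byte ∧ byte ≤ 122) ∨
              (48 ≤ byte ∧ byte ≤ 57) ∨ byte = 45 ∨ byte = 95 ∨ byte = 46 ∨ byte = 126
           then [Char.ofNat byte]                                  -- chr(byte)
           else ['%', pvHexDigit (byte / 16), pvHexDigit (byte % 16)]))  -- f"%{byte:02X}"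
      [])

-- ===== PORT B =====
-- _SAFE: the bytes literal of Source B, i.e. the sequence of its byte values (Python bytes are ints)
def pvSafeBytes : List Nat :=
  [65, 66, 67, 68, 69, 70, 71, 72, 73, 74, 75, 76, 77, 78, 79, 80, 81, 82, 83, 84, 85, 86,
   87, 88, 89, 90, 97, 98, 99, 100, 101, 102, 103, 104, 105, 106, 107, 108, 109, 110, 111,
   112, 113, 114, 115, 116, 117, 118, 119, 120, 121, 122, 48, 49, 50, 51, 52, 53, 54, 55,
   56, 57, 45, 95, 46, 126]

-- 'data[j] in _SAFE' on one byte
def pvIsSafe (c : Char) : Bool := pvSafeBytes.contains c.toNat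

-- the while-loop of Source B: the inner 'while … in _SAFE' is the maximal safe prefix (span),
-- then the one unsafe byte (if any) is percent-encoded and the scan continues after it
def pvEncodeRuns (l : List Char) : List Char :=
  let run := l.takeWhile pvIsSafe                      -- data[i:j].decode('ascii')
  match h : l.dropWhile pvIsSafe with
  | [] => run
  | c :: tl =>
      run ++ ('%' :: pvHexDigit (c.toNat / 16) :: pvHexDigit (c.toNat % 16) :: pvEncodeRuns tl)
termination_by l.length
decreasing_by
  have hle := List.length_dropWhile_le pvIsSafe l
  simp [h] at hle; omega

def uri_encode_alt (s : String) : String := String.mk (pvEncodeRuns s.toList)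

-- ===== PRECONDITION & SPEC =====
def Spec_uri_encode (s : String) (out : String) : Prop := out = uri_encode_alt s
instance (s : String) (out : String) : Decidable (Spec_uri_encode s out) := by unfold Spec_uri_encode; infer_instance

-- ===== CLAIM (what is proved, stated in full; the proofs are below) =====
def Claim_equal_uri_encode : Prop := ∀ (s : String), Dom_uri_encode s → Spec_uri_encode s (uri_encode s)

-- ===== LEMMAS AND PROOFS =====

-- A's per-byte step, as a function of the byte value alone
def pvStepA (byte : Nat) : List Char :=
  if (65 ≤ byte ∧ byte ≤ 90) ∨ (97 ≤ byte ∧ byte ≤ 122) ∨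
     (48 ≤ byte ∧ byte ≤ 57) ∨ byte = 45 ∨ byte = 95 ∨ byte = 46 ∨ byte = 126
  then [Char.ofNat byte]
  else ['%', pvHexDigit (byte / 16), pvHexDigit (byte % 16)]

-- B's per-byte contribution (what one byte adds to the output of the run scan)
def pvStepB (c : Char) : List Char :=
  if pvIsSafe c then [c] else ['%', pvHexDigit (c.toNat / 16), pvHexDigit (c.toNat % 16)]

set_option maxRecDepth 4096 in
theorem pvSafe_iff (n : Nat) (h : n < 256) :
    pvSafeBytes.contains n =
      decide ((65 ≤ n ∧ n ≤ 90) ∨ (97 ≤ n ∧ n ≤ 122) ∨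
              (48 ≤ n ∧ n ≤ 57) ∨ n = 45 ∨ n = 95 ∨ n = 46 ∨ n = 126) := by
  revert h; revert n; decide

theorem pv_char_lt (c : Char) (h : pvDomChar c = true) : c.toNat < 256 := by
  simp [pvDomChar] at h
  omega

theorem pvStepA_eq_stepB (c : Char) (h : pvDomChar c = true) : pvStepA c.toNat = pvStepB c := by
  unfold pvStepA pvStepB pvIsSafe
  rw [pvSafe_iff c.toNat (pv_char_lt c h)]
  by_cases hc : (65 ≤ c.toNat ∧ c.toNat ≤ 90) ∨ (97 ≤ c.toNat ∧ c.toNat ≤ 122) ∨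
      (48 ≤ c.toNat ∧ c.toNat ≤ 57) ∨ c.toNat = 45 ∨ c.toNat = 95 ∨ c.toNat = 46 ∨ c.toNat = 126
  · simp [hc, Char.ofNat_toNat]
  · simp [hc]

theorem pvFlatMap_safe (l : List Char) (h : ∀ c ∈ l, pvIsSafe c = true) :
    l.flatMap pvStepB = l := by
  induction l with
  | nil => rfl
  | cons c tl ih =>
      have hc := h c (by simp)
      simp [List.flatMap_cons, pvStepB, hc, ih (fun x hx => h x (by simp [hx]))]

theorem pvEncodeRuns_eq_flatMap (l : List Char) : pvEncodeRuns l = l.flatMap pvStepB := by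
  have main : ∀ n (l : List Char), l.length = n → pvEncodeRuns l = l.flatMap pvStepB := by
    intro n
    induction n using Nat.strong_induction_on with
    | _ n ih =>
      intro l hl
      rw [pvEncodeRuns]
      split
      · next h =>
        have hself : l.takeWhile pvIsSafe = l := by
          have := List.takeWhile_append_dropWhile (p := pvIsSafe) (l := l)
          rw [h] at this; simpa using this
        rw [hself, pvFlatMap_safe l]
        intro c hc
        exact List.mem_takeWhile_imp (by rw [hself]; exact hc)
      · next c tl h =>
        have hle := List.length_dropWhile_le pvIsSafe l
        rw [h] at hle; simp at hle
        have hpc : pvIsSafe c = false := by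
          have hne : l.dropWhile pvIsSafe ≠ [] := by simp [h]
          have := List.head_dropWhile_not pvIsSafe hne
          simpa [h] using this
        have hsplit : l = l.takeWhile pvIsSafe ++ c :: tl := by
          conv_lhs => rw [← List.takeWhile_append_dropWhile (p := pvIsSafe) (l := l)]
          rw [h]
        rw [ih tl.length (by omega) tl rfl]
        conv_rhs => rw [hsplit]
        rw [List.flatMap_append, List.flatMap_cons,
            pvFlatMap_safe _ (fun x hx => List.mem_takeWhile_imp hx)]
        simp [pvStepB, hpc]
  exact main l.length l rfl

-- ===== VERDICT =====
theorem uri_encode_spec : Claim_equal_uri_encode := by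
  intro s hdom
  unfold Spec_uri_encode uri_encode uri_encode_alt
  have hall : ∀ c ∈ s.toList, pvDomChar c = true := by
    simpa [Dom_uri_encode, pvDomStr, List.all_eq_true] using hdom
  congr 1
  have hstep :
      (fun encoded c =>
        let byte := c.toNat
        encoded ++
          (if (65 ≤ byte ∧ byte ≤ 90) ∨ (97 ≤ byte ∧ byte ≤ 122) ∨
              (48 ≤ byte ∧ byte ≤ 57) ∨ byte = 45 ∨ byte = 95 ∨ byte = 46 ∨ byte = 126
           then [Char.ofNat byte]
           else ['%', pvHexDigit (byte / 16), pvHexDigit (byte % 16)]))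
      = (fun (encoded : List Char) (c : Char) => encoded ++ pvStepA c.toNat) := by
    funext encoded c; rfl
  rw [hstep, PySem.List.foldl_append_eq_flatMap (fun c => pvStepA c.toNat) s.toList [],
      pvEncodeRuns_eq_flatMap]
  simp only [List.nil_append, List.flatMap_def]
  congr 1
  apply List.map_congr_left
  intro c hc
  exact pvStepA_eq_stepB c (hall c hc)
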